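-- pv_equiv track=rewrite | github.com/vEnhance/mosp.evanchen.cc | ancient/autograder/key.py | f15
-- ===== SOURCE A (Python) =====
-- def f15(n : int) -> int:
-- 	assert n >= 12
-- 	record = 0
-- 	for d in range(1,n//12+1):
-- 		for x in range(1,n//(2*d)):
-- 			for y in range(1,n//(2*d*x)):
-- 				a = 2*x*y*d
-- 				b = (x*x-y*y)*d
-- 				c = (x*x+y*y)*d
-- 				if a+b+c <= n:
-- 					record = max(record, a*b-c)
-- 	assert record > 0
-- 	return record
-- ===== SOURCE B (Python) =====
-- def f15(n: int) -> int:
--     assert n >= 12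
--     record = 0
--     # Any contributing triple (d,x,y) has x > y (else a*b-c < 0) and perimeter
--     # a+b+c = 2*x*d*(x+y) <= n; the value grows with d, so only the largest
--     # admissible d = n // (2*x*(x+y)) matters.  x >= 2 and x+y >= 3 force
--     # 6*x <= n, so x <= n//6.
--     for x in range(2, n // 6 + 1):
--         ymax = min(x - 1, n // (2 * x) - x)
--         for y in range(1, ymax + 1):
--             d = n // (2 * x * (x + y))
--             v = 2 * x * y * d * (x * x - y * y) * d - (x * x + y * y) * d
--             record = max(record, v)
--     assert record > 0
--     return record
-- ===== Notes on version B (the rewrite author's own statement) =====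
-- stated objective: faster
-- what changed: B eliminates the innermost-two loop dimensions' redundancy: since the value grows with the scale factor d (for x>y) it only evaluates each (x,y) pair once at the single maximal admissible d = n//(2*x*(x+y)), instead of A's triple loop over all (d,x,y).
import Mathlib
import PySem

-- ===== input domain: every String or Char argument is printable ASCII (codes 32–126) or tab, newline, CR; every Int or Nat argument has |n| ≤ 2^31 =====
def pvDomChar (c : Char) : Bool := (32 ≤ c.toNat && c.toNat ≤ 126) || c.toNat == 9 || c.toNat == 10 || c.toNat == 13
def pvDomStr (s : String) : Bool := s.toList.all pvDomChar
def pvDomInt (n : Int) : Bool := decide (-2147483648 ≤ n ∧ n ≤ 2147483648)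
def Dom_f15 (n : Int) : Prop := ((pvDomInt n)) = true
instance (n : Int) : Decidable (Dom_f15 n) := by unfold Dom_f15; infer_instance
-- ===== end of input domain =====

-- B replaces A's triple loop over (d,x,y) by a double loop over (x,y) evaluated only at
-- the maximal admissible scale d = n//(2*x*(x+y)) (the value grows with d when x > y).

-- ===== PORT A =====
def f15 (n : Int) : Int :=
  (PySem.List.pyRange 1 (PySem.Int.floordiv n 12 + 1) 1).foldl (fun r1 d =>
    (PySem.List.pyRange 1 (PySem.Int.floordiv n (2*d)) 1).foldl (fun r2 x =>
      (PySem.List.pyRange 1 (PySem.Int.floordiv n (2*d*x)) 1).foldl (fun r3 y =>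
        let a := 2*x*y*d
        let b := (x*x - y*y)*d
        let c := (x*x + y*y)*d
        if a + b + c ≤ n then max r3 (a*b - c) else r3) r2) r1) 0

-- ===== PORT B =====
def f15_alt (n : Int) : Int :=
  (PySem.List.pyRange 2 (PySem.Int.floordiv n 6 + 1) 1).foldl (fun r1 x =>
    let ymax := min (x - 1) (PySem.Int.floordiv n (2*x) - x)
    (PySem.List.pyRange 1 (ymax + 1) 1).foldl (fun r2 y =>
      let d := PySem.Int.floordiv n (2*x*(x+y))
      let v := 2*x*y*d*(x*x - y*y)*d - (x*x + y*y)*d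
      max r2 v) r1) 0

-- ===== PRECONDITION & SPEC =====
-- Pre excludes n < 12, on which A's `assert n >= 12` raises AssertionError.
def Pre_f15 (n : Int) : Prop := 12 ≤ n
instance (n : Int) : Decidable (Pre_f15 n) := by unfold Pre_f15; infer_instance
def pvWitness_f15 : Int := 12

def Spec_f15 (n : Int) (out : Int) : Prop := out = f15_alt n
instance (n : Int) (out : Int) : Decidable (Spec_f15 n out) := by unfold Spec_f15; infer_instance

-- ===== CLAIM (what is proved, stated in full; the proofs are below) =====
def Claim_equal_f15 : Prop := ∀ (n : Int), Dom_f15 n → Pre_f15 n → Spec_f15 n (f15 n)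

-- ===== LEMMAS AND PROOFS =====

-- generic max-fold toolkit
theorem pvLeFoldlMax (l : List Int) (init : Int) : init ≤ l.foldl max init := by
  induction l generalizing init with
  | nil => exact le_refl _
  | cons a t ih => exact le_trans (le_max_left init a) (ih _)

theorem pvFoldlMaxLe (l : List Int) (init T : Int) (h0 : init ≤ T)
    (h : ∀ a ∈ l, a ≤ T) : l.foldl max init ≤ T := by
  induction l generalizing init with
  | nil => exact h0
  | cons a t ih =>
      exact ih _ (max_le h0 (h a (List.mem_cons_self))) (fun b hb => h b (List.mem_cons_of_mem _ hb))

theorem pvLeFoldlMaxOfMem {l : List Int} {a : Int} (h : a ∈ l) (init : Int) :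
    a ≤ l.foldl max init := by
  induction l generalizing init with
  | nil => cases h
  | cons b t ih =>
      rcases List.mem_cons.1 h with rfl | h'
      · exact le_trans (le_max_right init a) (pvLeFoldlMax t _)
      · exact ih h' _

theorem pvFoldlIf {α : Type} (p : α → Prop) [DecidablePred p] (f : α → Int)
    (l : List α) (init : Int) :
    l.foldl (fun r y => if p y then max r (f y) else r) init
      = (l.filterMap (fun y => if p y then some (f y) else none)).foldl max init := by
  induction l generalizing init with
  | nil => rfl
  | cons a t ih =>
      simp only [List.foldl_cons, List.filterMap_cons]
      split_ifs with hp <;> simp [ih]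

theorem pvFoldlMap {α : Type} (f : α → Int) (l : List α) (init : Int) :
    l.foldl (fun r y => max r (f y)) init = (l.map f).foldl max init := by
  induction l generalizing init with
  | nil => rfl
  | cons a t ih => simp [List.foldl_cons, ih]

theorem pvFoldlFlat {α : Type} (g : α → List Int) (l : List α) (init : Int) :
    l.foldl (fun r e => (g e).foldl max r) init = (l.flatMap g).foldl max init := by
  induction l generalizing init with
  | nil => rfl
  | cons a t ih => simp [List.foldl_append, ih]

-- candidate lists
def pvCandsA (n : Int) : List Int :=
  (PySem.List.pyRange 1 (PySem.Int.floordiv n 12 + 1) 1).flatMap (fun d =>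
    (PySem.List.pyRange 1 (PySem.Int.floordiv n (2*d)) 1).flatMap (fun x =>
      (PySem.List.pyRange 1 (PySem.Int.floordiv n (2*d*x)) 1).filterMap (fun y =>
        if 2*x*y*d + ((x*x - y*y)*d) + ((x*x + y*y)*d) ≤ n
        then some (2*x*y*d * ((x*x - y*y)*d) - (x*x + y*y)*d) else none)))

def pvCandsB (n : Int) : List Int :=
  (PySem.List.pyRange 2 (PySem.Int.floordiv n 6 + 1) 1).flatMap (fun x =>
    (PySem.List.pyRange 1 (min (x - 1) (PySem.Int.floordiv n (2*x) - x) + 1) 1).map (fun y =>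
      2*x*y*(PySem.Int.floordiv n (2*x*(x+y)))*(x*x - y*y)*(PySem.Int.floordiv n (2*x*(x+y)))
        - (x*x + y*y)*(PySem.Int.floordiv n (2*x*(x+y)))))

theorem pvAeq (n : Int) : f15 n = (pvCandsA n).foldl max 0 := by
  unfold f15 pvCandsA
  rw [← pvFoldlFlat]
  refine List.foldl_ext _ _ _ (fun r1 d _ => ?_)
  rw [← pvFoldlFlat]
  refine List.foldl_ext _ _ _ (fun r2 x _ => ?_)
  rw [← pvFoldlIf]

theorem pvBeq (n : Int) : f15_alt n = (pvCandsB n).foldl max 0 := by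
  unfold f15_alt pvCandsB
  rw [← pvFoldlFlat]
  refine List.foldl_ext _ _ _ (fun r1 x _ => ?_)
  rw [← pvFoldlMap]


theorem pvALeB (n : Int) : ∀ v ∈ pvCandsA n, v ≤ f15_alt n := by
  intro v hv
  have hBnn : (0:Int) ≤ f15_alt n := by rw [pvBeq]; exact pvLeFoldlMax _ _
  simp only [pvCandsA, List.mem_flatMap, List.mem_filterMap, PySem.List.mem_pyRange_one] at hv
  obtain ⟨d, ⟨hd1, _⟩, x, ⟨hx1, _⟩, y, ⟨hy1, _⟩, hv⟩ := hv
  by_cases hc : 2*x*y*d + ((x*x - y*y)*d) + ((x*x + y*y)*d) ≤ n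
  · rw [if_pos hc, Option.some_inj] at hv
    subst hv
    by_cases hxy : y < x
    · set D := PySem.Int.floordiv n (2*x*(x+y)) with hD
      have hpos : (0:Int) < 2*x*(x+y) := by nlinarith
      have hdD : d ≤ D := (PySem.Int.le_floordiv_iff_mul_le hpos).mpr (by nlinarith)
      have hx6 : x ≤ PySem.Int.floordiv n 6 :=
        (PySem.Int.le_floordiv_iff_mul_le (by norm_num)).mpr (by nlinarith)
      have hyF : x + y ≤ PySem.Int.floordiv n (2*x) :=
        (PySem.Int.le_floordiv_iff_mul_le (by nlinarith)).mpr (by nlinarith)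
      have hmem : (2*x*y*D*(x*x - y*y)*D - (x*x + y*y)*D) ∈ pvCandsB n := by
        simp only [pvCandsB, List.mem_flatMap, List.mem_map, PySem.List.mem_pyRange_one]
        refine ⟨x, ⟨by omega, by omega⟩, y, ⟨by omega, ?_⟩, by rw [hD]⟩
        omega
      have t1 : (0:Int) ≤ 2*x*y*(x+y)*(x-y-1) :=
        mul_nonneg (mul_nonneg (mul_nonneg (by linarith) (by linarith)) (by linarith)) (by omega)
      have t2 : (0:Int) ≤ 2*(x*x)*(y-1) := mul_nonneg (by positivity) (by omega)
      have t3 : (0:Int) ≤ 2*(y*y)*(x-1) := mul_nonneg (by positivity) (by omega)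
      have hA : x*x + y*y ≤ 2*x*y*(x*x - y*y) := by nlinarith [t1, t2, t3]
      have hA0 : (0:Int) ≤ 2*x*y*(x*x - y*y) := le_trans (by positivity) hA
      have h2 : x*x + y*y ≤ 2*x*y*(x*x - y*y)*(D+d) := by
        nlinarith [mul_nonneg hA0 (by omega : (0:Int) ≤ D + d - 2)]
      have key : (0:Int) ≤ (D - d) * (2*x*y*(x*x - y*y)*(D+d) - (x*x + y*y)) :=
        mul_nonneg (by omega) (by linarith)
      have hmono : 2*x*y*d*((x*x - y*y)*d) - (x*x + y*y)*d
          ≤ 2*x*y*D*(x*x - y*y)*D - (x*x + y*y)*D := by nlinarith [key]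
      exact le_trans hmono (by rw [pvBeq]; exact pvLeFoldlMaxOfMem hmem 0)
    · have u2 : (0:Int) ≤ (x*x + y*y)*d := mul_nonneg (by positivity) (by linarith)
      have u1 : (0:Int) ≤ 2*x*y*(d*d)*((y-x)*(y+x)) :=
        mul_nonneg (mul_nonneg (mul_nonneg (by linarith) (by linarith)) (by positivity))
          (mul_nonneg (by omega) (by linarith))
      have hv0 : 2*x*y*d*((x*x - y*y)*d) - (x*x + y*y)*d ≤ 0 := by
        have hid : 2*x*y*d*((x*x - y*y)*d) - (x*x + y*y)*d
            = -(2*x*y*(d*d)*((y-x)*(y+x))) - (x*x + y*y)*d := by ring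
        rw [hid]; linarith
      exact le_trans hv0 hBnn
  · rw [if_neg hc] at hv; cases hv

theorem pvBLeA (n : Int) : ∀ v ∈ pvCandsB n, v ≤ f15 n := by
  intro v hv
  simp only [pvCandsB, List.mem_flatMap, List.mem_map, PySem.List.mem_pyRange_one] at hv
  obtain ⟨x, ⟨hx2, _⟩, y, ⟨hy1, hy2⟩, hv⟩ := hv
  have hyx : y ≤ x - 1 := by omega
  have hyn : x + y ≤ PySem.Int.floordiv n (2*x) := by omega
  have h2x : (0:Int) < 2*x := by omega
  set d := PySem.Int.floordiv n (2*x*(x+y)) with hd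
  have hpos : (0:Int) < 2*x*(x+y) := by nlinarith
  have hdn : d * (2*x*(x+y)) ≤ n := (PySem.Int.le_floordiv_iff_mul_le hpos).mp (le_refl d)
  have hxyn : (x+y) * (2*x) ≤ n := (PySem.Int.le_floordiv_iff_mul_le h2x).mp hyn
  have hd1 : 1 ≤ d := (PySem.Int.le_floordiv_iff_mul_le hpos).mpr (by nlinarith)
  have h12 : (12:Int) ≤ 2*x*(x+y) := by nlinarith [mul_nonneg (by omega : (0:Int) ≤ x - 2) (by omega : (0:Int) ≤ x + y)]
  have hd12 : d ≤ PySem.Int.floordiv n 12 :=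
    (PySem.Int.le_floordiv_iff_mul_le (by norm_num)).mpr
      (by nlinarith [mul_nonneg (by omega : (0:Int) ≤ d) (by linarith : (0:Int) ≤ 2*x*(x+y) - 12)])
  have h2d : (0:Int) < 2*d := by omega
  have h2dx : (0:Int) < 2*d*x := by nlinarith
  have hxr : x + 1 ≤ PySem.Int.floordiv n (2*d) :=
    (PySem.Int.le_floordiv_iff_mul_le h2d).mpr (by nlinarith)
  have hyr : y + 1 ≤ PySem.Int.floordiv n (2*d*x) :=
    (PySem.Int.le_floordiv_iff_mul_le h2dx).mpr (by nlinarith)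
  have hcond : 2*x*y*d + ((x*x - y*y)*d) + ((x*x + y*y)*d) ≤ n := by nlinarith
  have hmem : (2*x*y*d*((x*x - y*y)*d) - (x*x + y*y)*d) ∈ pvCandsA n := by
    simp only [pvCandsA, List.mem_flatMap, List.mem_filterMap, PySem.List.mem_pyRange_one]
    exact ⟨d, ⟨hd1, by omega⟩, x, ⟨by omega, by omega⟩, y, ⟨hy1, by omega⟩,
      by rw [if_pos hcond]⟩
  have hvle : v ≤ 2*x*y*d*((x*x - y*y)*d) - (x*x + y*y)*d := by rw [← hv]; ring_nf; exact le_refl _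
  exact le_trans hvle (by rw [pvAeq]; exact pvLeFoldlMaxOfMem hmem 0)

-- ===== VERDICT (by name: the statement is the Claim_ definition above) =====
theorem f15_spec : Claim_equal_f15 := by
  intro n _ _
  unfold Spec_f15
  apply le_antisymm
  · rw [pvAeq]
    exact pvFoldlMaxLe _ _ _ (by rw [pvBeq]; exact pvLeFoldlMax _ _) (pvALeB n)
  · rw [pvBeq]
    exact pvFoldlMaxLe _ _ _ (by rw [pvAeq]; exact pvLeFoldlMax _ _) (pvBLeA n)
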